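-- pv_equiv track=rewrite | github.com/firez2469/ProjectTyrell | Assets/Tools/map_creator_2.0/main.py | _is_valid_cycle
-- ===== SOURCE A (Python) =====
-- def _is_valid_cycle(cycle, edge_set):
--     """Check if a cycle is valid: all boundary edges exist and no internal edges"""
--     if len(cycle) < 3:
--         return False
--
--     # Check boundary edges
--     for i in range(len(cycle)):
--         p1 = cycle[i]
--         p2 = cycle[(i + 1) % len(cycle)]
--         if (min(p1, p2), max(p1, p2)) not in edge_set:
--             return False
--
--     # Check for internal edges (non-adjacent)
--     if len(cycle) > 3:
--         for i in range(len(cycle)):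
--             for j in range(i + 2, len(cycle)):
--                 if j == (i + 1) % len(cycle) or (i == 0 and j == len(cycle) - 1):
--                     continue
--                 edge = (min(cycle[i], cycle[j]), max(cycle[i], cycle[j]))
--                 if edge in edge_set:
--                     return False
--
--     return True
-- ===== SOURCE B (Python) =====
-- def _is_valid_cycle(cycle, edge_set):
--     """Boundary pass, then invert the chord search: index each value's positions
--     once and scan edge_set, reporting a chord when some listed edge joins two
--     non-adjacent positions of the cycle."""
--     n = len(cycle)
--     if n < 3:
--         return False
--     for k in range(n):
--         a, b = cycle[k], cycle[(k + 1) % n]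
--         if (min(a, b), max(a, b)) not in edge_set:
--             return False
--     pos = {}
--     for idx, v in enumerate(cycle):
--         pos.setdefault(v, []).append(idx)
--     for a, b in edge_set:
--         if a > b:
--             continue
--         for i in pos.get(a, []):
--             for j in pos.get(b, []):
--                 if i != j and abs(i - j) != 1 and abs(i - j) != n - 1:
--                     return False
--     return True
-- ===== Notes on version B (the rewrite author's own statement) =====
-- stated objective: alternative
-- what changed: A detects chords by enumerating all O(n^2) non-adjacent index pairs and testing each normalized pair for membership in edge_set; B builds a value-to-positions index of the cycle once and instead scans edge_set, flagging a chord when a listed edge connects two non-adjacent positions, so the all-pairs enumeration disappears.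
import Mathlib
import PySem

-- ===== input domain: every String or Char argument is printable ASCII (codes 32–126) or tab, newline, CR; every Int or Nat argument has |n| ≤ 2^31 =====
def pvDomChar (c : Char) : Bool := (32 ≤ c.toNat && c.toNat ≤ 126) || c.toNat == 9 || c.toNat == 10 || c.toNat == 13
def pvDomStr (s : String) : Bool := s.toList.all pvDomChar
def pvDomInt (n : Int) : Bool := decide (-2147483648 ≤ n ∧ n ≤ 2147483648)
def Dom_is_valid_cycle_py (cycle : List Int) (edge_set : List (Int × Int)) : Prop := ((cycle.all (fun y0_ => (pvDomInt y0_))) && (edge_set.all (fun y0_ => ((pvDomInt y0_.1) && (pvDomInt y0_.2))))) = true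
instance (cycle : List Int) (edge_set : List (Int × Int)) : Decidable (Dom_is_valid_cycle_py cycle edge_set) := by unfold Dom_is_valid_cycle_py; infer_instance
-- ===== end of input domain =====

-- B replaces A's all-pairs chord enumeration by a value→positions index of the cycle
-- and a single scan over edge_set (objective: alternative).

-- ===== PORT A =====
-- Literal transliteration of A: guard, boundary loop with (i+1) % n, then the
-- chord double loop (range(i+2, n)) guarded by len(cycle) > 3, with both skip tests.
def is_valid_cycle_py (cycle : List Int) (edge_set : List (Int × Int)) : Bool :=
  let n := cycle.length
  if n < 3 then false
  else
    let boundary :=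
      (List.range n).all (fun i =>
        let p1 := cycle.getD i 0
        let p2 := cycle.getD ((i + 1) % n) 0
        edge_set.contains (min p1 p2, max p1 p2))
    if !boundary then false
    else
      let chords :=
        if n > 3 then
          (List.range n).all (fun i =>
            (List.range' (i + 2) (n - (i + 2))).all (fun j =>
              if j = (i + 1) % n ∨ (i = 0 ∧ j = n - 1) then true
              else
                let edge := (min (cycle.getD i 0) (cycle.getD j 0),
                             max (cycle.getD i 0) (cycle.getD j 0))
                !edge_set.contains edge))
        else true
      chords

-- ===== PORT B =====
-- Literal transliteration of B: boundary loop, then pos = positions-per-value dict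
-- built by setdefault/append, then a scan over edge_set that flags any listed edge
-- joining two non-adjacent positions of the cycle.
def is_valid_cycle_py_alt (cycle : List Int) (edge_set : List (Int × Int)) : Bool :=
  let n := cycle.length
  if n < 3 then false
  else
    let boundary :=
      (List.range n).all (fun k =>
        let a := cycle.getD k 0
        let b := cycle.getD ((k + 1) % n) 0
        edge_set.contains (min a b, max a b))
    if !boundary then false
    else
      let pos : PySem.Dict Int (List Int) :=
        (PySem.List.enumerate cycle).foldl
          (fun d p => d.modify p.2 [] (· ++ [p.1])) PySem.Dict.empty
      edge_set.all (fun e =>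
        if e.1 > e.2 then true
        else
          (pos.getD e.1 []).all (fun i =>
            (pos.getD e.2 []).all (fun j =>
              if i ≠ j ∧ |i - j| ≠ 1 ∧ |i - j| ≠ (n : Int) - 1 then false
              else true)))

-- ===== PRECONDITION & SPEC =====
def Spec_is_valid_cycle_py (cycle : List Int) (edge_set : List (Int × Int)) (out : Bool) : Prop := out = is_valid_cycle_py_alt cycle edge_set
instance (cycle : List Int) (edge_set : List (Int × Int)) (out : Bool) : Decidable (Spec_is_valid_cycle_py cycle edge_set out) := by unfold Spec_is_valid_cycle_py; infer_instance

-- ===== CLAIM (what is proved, stated in full; the proofs are below) =====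
def Claim_equal_is_valid_cycle_py : Prop := ∀ (cycle : List Int) (edge_set : List (Int × Int)), Dom_is_valid_cycle_py cycle edge_set → Spec_is_valid_cycle_py cycle edge_set (is_valid_cycle_py cycle edge_set)

-- ===== LEMMAS AND PROOFS =====

-- The position list B's dict stores under a is the index list of a's occurrences.
theorem pos_getD (cycle : List Int) (a : Int) :
    ((PySem.List.enumerate cycle).foldl (fun d p => d.modify p.2 [] (· ++ [p.1])) PySem.Dict.empty).getD a []
    = ((PySem.List.enumerate cycle).filter (fun p => p.2 == a)).map (·.1) := by
  have h := PySem.Dict.getD_foldl_modify_append ((PySem.List.enumerate cycle).map Prod.swap) (PySem.Dict.empty (κ := Int) (ν := List Int)) a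
  rw [List.foldl_map] at h
  simp only [Prod.swap] at h
  rw [h]
  simp [List.filter_map, List.map_map, Function.comp_def, Prod.swap]

theorem pos_mem (cycle : List Int) (a i : Int) :
    i ∈ ((PySem.List.enumerate cycle).foldl (fun d p => d.modify p.2 [] (· ++ [p.1])) PySem.Dict.empty).getD a []
    ↔ ∃ (k : Nat) (h : k < cycle.length), i = (k : Int) ∧ cycle[k] = a := by
  rw [pos_getD]
  simp [List.mem_filter, PySem.List.mem_enumerate_iff]

theorem is_valid_cycle_py_agree (cycle : List Int) (edge_set : List (Int × Int)) :
    is_valid_cycle_py cycle edge_set = is_valid_cycle_py_alt cycle edge_set := by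
  unfold is_valid_cycle_py is_valid_cycle_py_alt
  by_cases h3 : cycle.length < 3
  · simp [h3]
  · simp only [h3, if_false]
    by_cases hb : ((List.range cycle.length).all fun i =>
        edge_set.contains (min (cycle.getD i 0) (cycle.getD ((i + 1) % cycle.length) 0),
          max (cycle.getD i 0) (cycle.getD ((i + 1) % cycle.length) 0))) = true
    · simp only [hb, Bool.not_true, Bool.false_eq_true, if_false]
      rw [Bool.eq_iff_iff]
      constructor
      · -- chords A → edge scan B
        intro hA
        simp only [List.all_eq_true]
        intro e he
        split
        · rfl
        · rename_i hle
          push Not at hle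
          simp only [List.all_eq_true]
          intro i hi j hj
          rw [pos_mem] at hi hj
          obtain ⟨ki, hki, rfl, hvi⟩ := hi
          obtain ⟨kj, hkj, rfl, hvj⟩ := hj
          split
          · rename_i hc
            obtain ⟨hne, habs1, habsn⟩ := hc
            rw [ne_eq, abs_eq (by norm_num : (0:Int) ≤ 1)] at habs1
            rw [ne_eq, abs_eq (by omega : (0:Int) ≤ (cycle.length : Int) - 1)] at habsn
            push Not at habs1 habsn
            have hkne : ki ≠ kj := by omega
            set u := min ki kj with hu
            set v := max ki kj with hv
            have huv : u + 2 ≤ v := by omega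
            have hvn : v < cycle.length := by omega
            have hnot : ¬(u = 0 ∧ v = cycle.length - 1) := by omega
            have hn4 : 3 < cycle.length := by omega
            rw [if_pos hn4] at hA
            simp only [List.all_eq_true, List.mem_range, List.mem_range'_1] at hA
            have hAuv := hA u (by omega) v ⟨by omega, by omega⟩
            rw [if_neg (by
              rintro (hsk | hsk)
              · rw [Nat.mod_eq_of_lt (by omega)] at hsk; omega
              · exact hnot hsk)] at hAuv
            simp only [Bool.not_eq_true'] at hAuv
            have hedge : (min (cycle.getD u 0) (cycle.getD v 0),
                max (cycle.getD u 0) (cycle.getD v 0)) = e := by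
              rcases Nat.lt_or_ge ki kj with hlt | hge
              · have h1 : u = ki := by omega
                have h2 : v = kj := by omega
                rw [h1, h2, List.getD_eq_getElem cycle 0 hki,
                    List.getD_eq_getElem cycle 0 hkj, hvi, hvj,
                    min_eq_left hle, max_eq_right hle]
              · have h1 : u = kj := by omega
                have h2 : v = ki := by omega
                rw [h1, h2, List.getD_eq_getElem cycle 0 hkj,
                    List.getD_eq_getElem cycle 0 hki, hvi, hvj,
                    min_eq_right hle, max_eq_left hle]
            rw [hedge, List.contains_eq_mem, decide_eq_false_iff_not] at hAuv
            exact absurd he hAuv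
          · rfl
      · -- edge scan B → chords A
        intro hB
        split
        · rename_i hn4
          simp only [List.all_eq_true, List.mem_range, List.mem_range'_1]
          intro i hi j hj
          split
          · rfl
          · rename_i hsk
            push Not at hsk
            obtain ⟨hj1, hj2⟩ := hj
            have hadj : j ≠ i + 1 := by
              rw [Nat.mod_eq_of_lt (by omega)] at hsk; exact hsk.1
            simp only [Bool.not_eq_true']
            rw [List.contains_eq_mem, decide_eq_false_iff_not]
            intro hmem
            rw [List.getD_eq_getElem cycle 0 (by omega : i < cycle.length),
                List.getD_eq_getElem cycle 0 (by omega : j < cycle.length)] at hmem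
            simp only [List.all_eq_true] at hB
            have hBe := hB _ hmem
            rw [if_neg (by simp : ¬(min cycle[i] cycle[j] > max cycle[i] cycle[j]))] at hBe
            simp only [List.all_eq_true] at hBe
            have hc1 : ¬(|(i:Int) - (j:Int)| = 1) := by
              rw [abs_eq (by norm_num : (0:Int) ≤ 1)]; push Not
              constructor <;> omega
            have hcn : ¬(|(i:Int) - (j:Int)| = (cycle.length:Int) - 1) := by
              rw [abs_eq (by omega : (0:Int) ≤ (cycle.length:Int) - 1)]; push Not
              refine ⟨by omega, ?_⟩
              intro h
              have : j = cycle.length - 1 := by omega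
              have hi0 : i = 0 := by omega
              exact hsk.2 hi0 this
            rcases le_total cycle[i] cycle[j] with hv | hv
            · have hmi := (pos_mem cycle (min cycle[i] cycle[j]) (i:Int)).mpr
                ⟨i, by omega, rfl, by rw [min_eq_left hv]⟩
              have hmj := (pos_mem cycle (max cycle[i] cycle[j]) (j:Int)).mpr
                ⟨j, by omega, rfl, by rw [max_eq_right hv]⟩
              have h4 := hBe _ hmi _ hmj
              rw [if_pos ⟨by omega, hc1, hcn⟩] at h4
              exact absurd h4 (by simp)
            · have hmi := (pos_mem cycle (min cycle[i] cycle[j]) (j:Int)).mpr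
                ⟨j, by omega, rfl, by rw [min_eq_right hv]⟩
              have hmj := (pos_mem cycle (max cycle[i] cycle[j]) (i:Int)).mpr
                ⟨i, by omega, rfl, by rw [max_eq_left hv]⟩
              have h4 := hBe _ hmi _ hmj
              rw [if_pos ⟨by omega, by rw [abs_sub_comm]; exact hc1,
                by rw [abs_sub_comm]; exact hcn⟩] at h4
              exact absurd h4 (by simp)
        · rfl
    · rw [Bool.not_eq_true] at hb
      rw [hb]
      simp

-- ===== VERDICT (by name: the statement is the Claim_ definition above) =====
theorem is_valid_cycle_py_spec : Claim_equal_is_valid_cycle_py := by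
  intro cycle edge_set _
  exact is_valid_cycle_py_agree cycle edge_set
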